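-- pv_equiv track=rewrite | github.com/VanHack/7snake-1 | 7snake.py | get_shapes
-- ===== SOURCE A (Python) =====
-- def get_shapes(shape, shapes, n):
--     if len(shape)==7:
--         minx = min(shape, key=lambda x: x[0])[0]
--         if minx<0:
--             shape = [(x-minx, y) for x, y in shape]
--         miny = min(shape, key=lambda x: x[1])[1]
--         if miny<0:
--             shape = [(x, y-miny) for x, y in shape]
--         shape.sort()
--         if shape not in shapes:
--             shapes.append(shape)
--     else:
--         x, y = shape[-1]
--         if     (x+1, y)   not in shape \
--            and (x+2, y)   not in shape \
--            and (x+1, y+1) not in shape \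
--            and (x+1, y-1) not in shape:
--             new_shape = shape + [(x+1, y)]
--             shapes = get_shapes(new_shape, shapes, n)
--         if     (x,   y+1) not in shape \
--            and (x,   y+2) not in shape \
--            and (x+1, y+1) not in shape \
--            and (x-1, y+1) not in shape:
--             new_shape = shape + [(x, y+1)]
--             shapes = get_shapes(new_shape, shapes, n)
--         if     (x-1, y)   not in shape \
--            and (x-2, y)   not in shape \
--            and (x-1, y+1) not in shape \
--            and (x-1, y-1) not in shape:
--             new_shape = shape + [(x-1, y)]
--             shapes = get_shapes(new_shape, shapes, n)
--         if     (x,   y-1) not in shape \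
--            and (x,   y-2) not in shape \
--            and (x+1, y-1) not in shape \
--            and (x-1, y-1) not in shape:
--             new_shape = shape + [(x, y-1)]
--             shapes = get_shapes(new_shape, shapes, n)
--     return shapes
-- ===== SOURCE B (Python) =====
-- def get_shapes(shape, shapes, n):
--     # Iterative DFS with an explicit stack instead of recursion; return value only
--     # (A also sorts/append-mutates its arguments in place, B only appends to shapes).
--     stack = [shape]
--     while stack:
--         cur = stack.pop()
--         if len(cur) == 7:
--             minx = min(x for x, y in cur)
--             miny = min(y for x, y in cur)
--             sx = minx if minx < 0 else 0
--             sy = miny if miny < 0 else 0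
--             cand = sorted((x - sx, y - sy) for x, y in cur)
--             if cand not in shapes:
--                 shapes.append(cand)
--         elif len(cur) < 7:
--             x, y = cur[-1]
--             # push in reverse order (down, left, up, right) so the DFS pops
--             # right, up, left, down -- the original exploration order
--             for dx, dy in ((0, -1), (-1, 0), (0, 1), (1, 0)):
--                 nxt = (x + dx, y + dy)
--                 blocked = (nxt, (x + 2 * dx, y + 2 * dy),
--                            (x + dx + dy, y + dy + dx), (x + dx - dy, y + dy - dx))
--                 if all(c not in cur for c in blocked):
--                     stack.append(cur + [nxt])
--     return shapes
-- ===== Notes on version B (the rewrite author's own statement) =====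
-- stated objective: alternative
-- what changed: Replaces the four-way recursive exploration with an explicit-stack iterative DFS (children pushed in reverse so pops preserve the original right/up/left/down preorder), folds A's two conditional coordinate shifts plus in-place sort into one shift-and-sort comprehension, and replaces the four copy-pasted guard blocks by a single data-driven loop over direction vectors.
import Mathlib
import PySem

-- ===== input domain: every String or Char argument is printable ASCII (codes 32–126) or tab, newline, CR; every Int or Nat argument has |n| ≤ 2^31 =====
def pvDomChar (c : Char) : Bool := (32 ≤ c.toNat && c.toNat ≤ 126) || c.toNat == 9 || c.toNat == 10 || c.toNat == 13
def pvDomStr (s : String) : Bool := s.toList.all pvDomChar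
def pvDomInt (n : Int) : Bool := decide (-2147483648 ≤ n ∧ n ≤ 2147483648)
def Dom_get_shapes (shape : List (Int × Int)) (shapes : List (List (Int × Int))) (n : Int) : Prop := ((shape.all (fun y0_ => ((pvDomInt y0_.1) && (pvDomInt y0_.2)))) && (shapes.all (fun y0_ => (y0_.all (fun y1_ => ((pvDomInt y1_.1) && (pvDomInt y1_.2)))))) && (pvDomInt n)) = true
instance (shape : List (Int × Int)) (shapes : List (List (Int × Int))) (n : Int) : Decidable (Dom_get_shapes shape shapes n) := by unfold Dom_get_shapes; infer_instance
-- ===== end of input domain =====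

-- B replaces A's four-way recursion by an explicit-stack DFS (same preorder); equivalence is about
-- the RETURN value only (Python A sorts `shape` and appends to `shapes` in place, B only appends).

-- ===== PORT A =====
-- the len(shape)==7 canonicalize-and-collect branch of A
def goACanon (shape : List (Int × Int)) (shapes : List (List (Int × Int))) : List (List (Int × Int)) :=
  match PySem.List.min? shape Prod.fst with
  | none => shapes
  | some mx =>
    let minx := mx.1
    let shape1 := if minx < 0 then shape.map (fun p => (p.1 - minx, p.2)) else shape
    match PySem.List.min? shape1 Prod.snd with
    | none => shapes
    | some my =>
      let miny := my.2
      let shape2 := if miny < 0 then shape1.map (fun p => (p.1, p.2 - miny)) else shape1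
      let sortedShape := PySem.List.sorted2 shape2 Prod.fst Prod.snd false
      if sortedShape ∈ shapes then shapes else shapes ++ [sortedShape]

-- literal port of A's recursion; the fuel only makes it total (8 exceeds the depth whenever Pre_ holds)
def goA : Nat → List (Int × Int) → List (List (Int × Int)) → List (List (Int × Int))
  | 0, _, shapes => shapes
  | fuel+1, shape, shapes =>
    if shape.length = 7 then goACanon shape shapes
    else
      match PySem.List.pyGet? shape (-1) with
      | none => shapes
      | some (x, y) =>
        let shapes := if !shape.contains (x+1, y) && !shape.contains (x+2, y) && !shape.contains (x+1, y+1) && !shape.contains (x+1, y-1)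
          then goA fuel (shape ++ [(x+1, y)]) shapes else shapes
        let shapes := if !shape.contains (x, y+1) && !shape.contains (x, y+2) && !shape.contains (x+1, y+1) && !shape.contains (x-1, y+1)
          then goA fuel (shape ++ [(x, y+1)]) shapes else shapes
        let shapes := if !shape.contains (x-1, y) && !shape.contains (x-2, y) && !shape.contains (x-1, y+1) && !shape.contains (x-1, y-1)
          then goA fuel (shape ++ [(x-1, y)]) shapes else shapes
        let shapes := if !shape.contains (x, y-1) && !shape.contains (x, y-2) && !shape.contains (x+1, y-1) && !shape.contains (x-1, y-1)
          then goA fuel (shape ++ [(x, y-1)]) shapes else shapes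
        shapes

def get_shapes (shape : List (Int × Int)) (shapes : List (List (Int × Int))) (n : Int) : List (List (Int × Int)) :=
  goA 8 shape shapes

-- ===== PORT B =====
-- stack measure used only for termination of the while-loop
def pvWeight (p : List (Int × Int)) : Nat := 5 ^ (8 - p.length)
def pvMeas (st : List (List (Int × Int))) : Nat := (st.map pvWeight).sum

-- one candidate extension of the loop body: the blocked-cell test for direction (dx, dy)
def altStep (cur : List (Int × Int)) (x y dx dy : Int) : Option (List (Int × Int)) :=
  if [(x + dx, y + dy), (x + 2*dx, y + 2*dy), (x + dx + dy, y + dy + dx), (x + dx - dy, y + dy - dx)].all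
       (fun c => !cur.contains c)
  then some (cur ++ [(x + dx, y + dy)]) else none

def altPush (cur : List (Int × Int)) (x y : Int) (st : List (List (Int × Int))) (d : Int × Int) : List (List (Int × Int)) :=
  match altStep cur x y d.1 d.2 with
  | some ns => ns :: st
  | none => st

-- the len(cur)==7 canonicalize-and-collect branch of B
def altCanon (cur : List (Int × Int)) (shapes : List (List (Int × Int))) : List (List (Int × Int)) :=
  match PySem.List.min? (cur.map Prod.fst) (fun v => v), PySem.List.min? (cur.map Prod.snd) (fun v => v) with
  | some minx, some miny =>
    let sx := if minx < 0 then minx else 0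
    let sy := if miny < 0 then miny else 0
    let cand := PySem.List.sorted2 (cur.map (fun p => (p.1 - sx, p.2 - sy))) Prod.fst Prod.snd false
    if cand ∈ shapes then shapes else shapes ++ [cand]
  | _, _ => shapes

-- termination helpers for the while-loop
theorem pvMeas_push_le (cur : List (Int × Int)) (x y : Int) :
    ∀ (ds : List (Int × Int)) (st : List (List (Int × Int))),
      pvMeas (ds.foldl (altPush cur x y) st) ≤ pvMeas st + ds.length * 5 ^ (7 - cur.length) := by
  intro ds
  induction ds with
  | nil => intro st; simp
  | cons d ds ih =>
    intro st
    have hstep : pvMeas (altPush cur x y st d) ≤ pvMeas st + 5 ^ (7 - cur.length) := by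
      unfold altPush altStep
      split
      · rename_i ns hns
        split at hns
        · cases hns
          have hl : (cur ++ [(x + d.1, y + d.2)]).length = cur.length + 1 := by simp
          have he : 8 - (cur.length + 1) = 7 - cur.length := by omega
          simp [pvMeas, pvWeight, hl, he]
          omega
        · cases hns
      · exact Nat.le_add_right _ _
    calc pvMeas ((d :: ds).foldl (altPush cur x y) st)
        = pvMeas (ds.foldl (altPush cur x y) (altPush cur x y st d)) := by simp [List.foldl]
      _ ≤ pvMeas (altPush cur x y st d) + ds.length * 5 ^ (7 - cur.length) := ih _
      _ ≤ pvMeas st + 5 ^ (7 - cur.length) + ds.length * 5 ^ (7 - cur.length) := by omega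
      _ ≤ pvMeas st + (d :: ds).length * 5 ^ (7 - cur.length) := by
          have : (d :: ds).length * 5 ^ (7 - cur.length) = ds.length * 5 ^ (7 - cur.length) + 5 ^ (7 - cur.length) := by
            simp [List.length_cons]; ring
          omega

theorem pv_dec_pop (cur : List (Int × Int)) (rest : List (List (Int × Int))) :
    pvMeas rest < pvMeas (cur :: rest) := by
  have h1 : 0 < pvWeight cur := Nat.pow_pos (by norm_num)
  simp only [pvMeas, List.map_cons, List.sum_cons]; omega

theorem pv_dec_push (cur : List (Int × Int)) (x y : Int) (rest : List (List (Int × Int)))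
    (hlt7 : cur.length < 7) :
    pvMeas ([((0:Int), (-1:Int)), (-1, 0), (0, 1), (1, 0)].foldl (altPush cur x y) rest) < pvMeas (cur :: rest) := by
  have h := pvMeas_push_le cur x y [((0:Int), (-1:Int)), (-1, 0), (0, 1), (1, 0)] rest
  simp only [List.length_cons, List.length_nil] at h
  have h2 : 0 < 5 ^ (7 - cur.length) := Nat.pow_pos (by norm_num)
  have h3 : pvWeight cur = 5 * 5 ^ (7 - cur.length) := by
    unfold pvWeight
    have he : 8 - cur.length = (7 - cur.length) + 1 := by omega
    rw [he, pow_succ]; ring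
  simp only [pvMeas, List.map_cons, List.sum_cons] at *
  omega

-- the while-loop over the explicit stack (head = top of stack)
def altLoop (stack : List (List (Int × Int))) (shapes : List (List (Int × Int))) : List (List (Int × Int)) :=
  match stack with
  | [] => shapes
  | cur :: rest =>
    if cur.length = 7 then altLoop rest (altCanon cur shapes)
    else if hlt7 : cur.length < 7 then
      match PySem.List.pyGet? cur (-1) with
      | none => altLoop rest shapes
      | some (x, y) =>
        altLoop ([((0:Int), (-1:Int)), (-1, 0), (0, 1), (1, 0)].foldl (altPush cur x y) rest) shapes
    else altLoop rest shapes
termination_by pvMeas stack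
decreasing_by
  · exact pv_dec_pop cur rest
  · exact pv_dec_pop cur rest
  · exact pv_dec_push cur x y rest hlt7
  · exact pv_dec_pop cur rest

def get_shapes_alt (shape : List (Int × Int)) (shapes : List (List (Int × Int))) (n : Int) : List (List (Int × Int)) :=
  altLoop [shape] shapes

-- ===== PRECONDITION & SPEC =====
-- Pre_ excludes the empty shape (A raises IndexError on shape[-1]) and shapes longer than 7 cells,
-- on which A almost always exceeds the recursion limit (RecursionError); on the rare blocked ones
-- where A does return it returns `shapes` unchanged, exactly as B does (see cites).
def Pre_get_shapes (shape : List (Int × Int)) (shapes : List (List (Int × Int))) (n : Int) : Prop :=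
  shape ≠ [] ∧ shape.length ≤ 7
instance (shape : List (Int × Int)) (shapes : List (List (Int × Int))) (n : Int) : Decidable (Pre_get_shapes shape shapes n) := by unfold Pre_get_shapes; infer_instance

def pvWitness_get_shapes : (List (Int × Int)) × (List (List (Int × Int))) × Int := ([((0:Int), (0:Int))], [], 7)

def Spec_get_shapes (shape : List (Int × Int)) (shapes : List (List (Int × Int))) (n : Int) (out : List (List (Int × Int))) : Prop := out = get_shapes_alt shape shapes n
instance (shape : List (Int × Int)) (shapes : List (List (Int × Int))) (n : Int) (out : List (List (Int × Int))) : Decidable (Spec_get_shapes shape shapes n out) := by unfold Spec_get_shapes; infer_instance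

-- ===== CLAIM (what is proved, stated in full; the proofs are below) =====
def Claim_equal_get_shapes : Prop := ∀ (shape : List (Int × Int)) (shapes : List (List (Int × Int))) (n : Int), Dom_get_shapes shape shapes n → Pre_get_shapes shape shapes n → Spec_get_shapes shape shapes n (get_shapes shape shapes n)

-- ===== LEMMAS AND PROOFS =====

theorem canon_eq (cur : List (Int × Int)) (shapes : List (List (Int × Int))) (h : cur ≠ []) :
    goACanon cur shapes = altCanon cur shapes := by
  obtain ⟨m, hm⟩ : ∃ m, PySem.List.min? cur Prod.fst = some m := by
    cases hc : PySem.List.min? cur Prod.fst with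
    | none => exact absurd ((PySem.List.min?_eq_none_iff _ _).mp hc) h
    | some m => exact ⟨m, rfl⟩
  obtain ⟨v, hv⟩ : ∃ v, PySem.List.min? (cur.map Prod.fst) (fun v => v) = some v := by
    cases hc : PySem.List.min? (cur.map Prod.fst) (fun v => v) with
    | none => exact absurd (List.map_eq_nil_iff.mp ((PySem.List.min?_eq_none_iff _ _).mp hc)) h
    | some v => exact ⟨v, rfl⟩
  obtain ⟨w, hw⟩ : ∃ w, PySem.List.min? (cur.map Prod.snd) (fun v => v) = some w := by
    cases hc : PySem.List.min? (cur.map Prod.snd) (fun v => v) with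
    | none => exact absurd (List.map_eq_nil_iff.mp ((PySem.List.min?_eq_none_iff _ _).mp hc)) h
    | some w => exact ⟨w, rfl⟩
  -- both programs compute the same minimal x coordinate
  have hmv : m.1 = v := by
    apply le_antisymm
    · obtain ⟨p, hp, hpv⟩ := List.mem_map.mp (PySem.List.min?_mem hv)
      exact hpv ▸ PySem.List.min?_isMin hm p hp
    · exact PySem.List.min?_isMin hv m.1 (List.mem_map_of_mem (PySem.List.min?_mem hm))
  -- A's conditional x shift is B's unconditional shift by min(minx, 0)
  have hshape1 : (if v < 0 then cur.map (fun p => (p.1 - v, p.2)) else cur)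
      = cur.map (fun p => (p.1 - (if v < 0 then v else 0), p.2)) := by
    by_cases hneg : v < 0 <;> simp [hneg]
  obtain ⟨m2, hm2⟩ : ∃ m2, PySem.List.min? (cur.map (fun p => (p.1 - (if v < 0 then v else 0), p.2))) Prod.snd = some m2 := by
    cases hc : PySem.List.min? (cur.map (fun p => (p.1 - (if v < 0 then v else 0), p.2))) Prod.snd with
    | none => exact absurd (List.map_eq_nil_iff.mp ((PySem.List.min?_eq_none_iff _ _).mp hc)) h
    | some m2 => exact ⟨m2, rfl⟩
  -- the x shift does not change y coordinates: same minimal y on both sides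
  have hm2w : m2.2 = w := by
    apply le_antisymm
    · obtain ⟨p, hp, hpw⟩ := List.mem_map.mp (PySem.List.min?_mem hw)
      have hmem : (p.1 - (if v < 0 then v else 0), p.2) ∈ cur.map (fun p => (p.1 - (if v < 0 then v else 0), p.2)) :=
        List.mem_map_of_mem hp
      have h2 := PySem.List.min?_isMin hm2 _ hmem
      simpa [hpw] using h2
    · obtain ⟨q, hq, hqm⟩ := List.mem_map.mp (PySem.List.min?_mem hm2)
      have h2 := PySem.List.min?_isMin hw q.2 (List.mem_map_of_mem hq)
      have h3 : m2.2 = q.2 := by rw [← hqm]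
      omega
  -- A's conditional y shift on the shifted list is B's one-pass shift
  have hshape2 : (if w < 0 then (cur.map (fun p => (p.1 - (if v < 0 then v else 0), p.2))).map (fun p => (p.1, p.2 - w))
        else cur.map (fun p => (p.1 - (if v < 0 then v else 0), p.2)))
      = cur.map (fun p => (p.1 - (if v < 0 then v else 0), p.2 - (if w < 0 then w else 0))) := by
    by_cases hneg : w < 0 <;> simp [hneg, List.map_map, Function.comp]
  unfold goACanon altCanon
  simp only [hm, hv, hw, hmv]
  rw [hshape1]
  simp only [hm2, hm2w]
  rw [hshape2]

theorem goA_fuel (f : Nat) : ∀ (g : Nat) (shape : List (Int × Int)) (s : List (List (Int × Int))),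
    shape.length ≤ 7 → 8 - shape.length ≤ f → 8 - shape.length ≤ g → goA f shape s = goA g shape s := by
  induction f with
  | zero => intro g shape s h1 h2 h3; omega
  | succ f ih =>
    intro g shape s h1 h2 h3
    cases g with
    | zero => omega
    | succ g =>
      by_cases h7 : shape.length = 7
      · simp [goA, h7]
      · have hlt : shape.length < 7 := by omega
        have hch : ∀ (c : Int × Int) (s' : List (List (Int × Int))),
            goA f (shape ++ [c]) s' = goA g (shape ++ [c]) s' := by
          intro c s'
          exact ih g (shape ++ [c]) s' (by simp; omega) (by simp; omega) (by simp; omega)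
        simp only [goA, if_neg h7]
        cases hx : PySem.List.pyGet? shape (-1) with
        | none => rfl
        | some xy =>
          obtain ⟨x, y⟩ := xy
          simp only [hch]

theorem altPush_R (cur : List (Int × Int)) (x y : Int) (st : List (List (Int × Int))) :
    altPush cur x y st (1, 0)
    = (if !cur.contains (x+1, y) && !cur.contains (x+2, y) && !cur.contains (x+1, y+1) && !cur.contains (x+1, y-1)
       then [cur ++ [(x+1, y)]] else []) ++ st := by
  unfold altPush altStep
  simp only [List.all_cons, List.all_nil, Bool.and_true]
  norm_num
  split_ifs with h1 h2 <;> try simp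
  all_goals tauto

theorem altPush_U (cur : List (Int × Int)) (x y : Int) (st : List (List (Int × Int))) :
    altPush cur x y st (0, 1)
    = (if !cur.contains (x, y+1) && !cur.contains (x, y+2) && !cur.contains (x+1, y+1) && !cur.contains (x-1, y+1)
       then [cur ++ [(x, y+1)]] else []) ++ st := by
  unfold altPush altStep
  simp only [List.all_cons, List.all_nil, Bool.and_true]
  norm_num
  split_ifs with h1 h2 <;> try simp
  all_goals tauto

theorem altPush_L (cur : List (Int × Int)) (x y : Int) (st : List (List (Int × Int))) :
    altPush cur x y st (-1, 0)
    = (if !cur.contains (x-1, y) && !cur.contains (x-2, y) && !cur.contains (x-1, y+1) && !cur.contains (x-1, y-1)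
       then [cur ++ [(x-1, y)]] else []) ++ st := by
  unfold altPush altStep
  simp only [List.all_cons, List.all_nil, Bool.and_true]
  norm_num
  split_ifs with h1 h2 <;> try simp
  all_goals tauto

theorem altPush_D (cur : List (Int × Int)) (x y : Int) (st : List (List (Int × Int))) :
    altPush cur x y st (0, -1)
    = (if !cur.contains (x, y-1) && !cur.contains (x, y-2) && !cur.contains (x+1, y-1) && !cur.contains (x-1, y-1)
       then [cur ++ [(x, y-1)]] else []) ++ st := by
  unfold altPush altStep
  simp only [List.all_cons, List.all_nil, Bool.and_true]
  norm_num
  split_ifs with h1 h2 <;> try simp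
  all_goals tauto

theorem foldl_ite_singleton {α β : Type} (F : β → α → β) (b : Bool) (c : α) (acc : β) :
    List.foldl F acc ((if b then [c] else []) : List α) = if b then F acc c else acc := by
  cases b <;> simp

theorem altLoop_eq : ∀ (st : List (List (Int × Int))) (s : List (List (Int × Int))),
    (∀ p ∈ st, p.length ≤ 7) →
    altLoop st s = st.foldl (fun acc p => goA (8 - p.length) p acc) s := by
  intro st s
  induction st, s using altLoop.induct with
  | case1 s => intro _; rw [altLoop]; rfl
  | case2 s cur rest h7 ih =>
    intro h
    rw [altLoop]
    simp only [if_pos h7]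
    rw [ih (fun p hp => h p (List.mem_cons_of_mem _ hp))]
    simp only [List.foldl_cons]
    have h1 : 8 - cur.length = 1 := by omega
    rw [h1]
    have hne : cur ≠ [] := by
      intro hc; rw [hc] at h7; simp at h7
    have : goA 1 cur s = altCanon cur s := by
      simp only [goA, if_pos h7]
      exact canon_eq cur s hne
    rw [this]
  | case3 s cur rest h7 hlt hx ih =>
    intro h
    rw [altLoop]
    simp only [if_neg h7, dif_pos hlt, hx]
    rw [ih (fun p hp => h p (List.mem_cons_of_mem _ hp))]
    simp only [List.foldl_cons]
    have hcur : cur = [] := by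
      rw [PySem.List.pyGet?_neg_one] at hx
      exact List.getLast?_eq_none_iff.mp hx
    subst hcur
    have hz : goA 8 ([] : List (Int × Int)) s = s := by
      rw [show (8:Nat) = 7+1 from rfl, goA]
      simp [PySem.List.pyGet?_neg_one]
    simp [hz]
  | case4 s cur rest h7 hlt x y hx ih =>
    intro h
    have hmem : ∀ p ∈ [((0:Int), (-1:Int)), (-1, 0), (0, 1), (1, 0)].foldl (altPush cur x y) rest, p.length ≤ 7 := by
      have key : ∀ (ds : List (Int × Int)) (st : List (List (Int × Int))) (p : List (Int × Int)),
          p ∈ ds.foldl (altPush cur x y) st → p ∈ st ∨ ∃ c, p = cur ++ [c] := by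
        intro ds
        induction ds with
        | nil => intro st p hp; exact Or.inl hp
        | cons d ds ihd =>
          intro st p hp
          rcases ihd (altPush cur x y st d) p hp with h1 | h2
          · unfold altPush at h1
            revert h1
            split
            · rename_i ns hns
              unfold altStep at hns
              split at hns
              · cases hns
                intro h1
                rcases List.mem_cons.mp h1 with h3 | h3
                · exact Or.inr ⟨_, h3⟩
                · exact Or.inl h3
              · cases hns
            · intro h1; exact Or.inl h1
          · exact Or.inr h2
      intro p hp
      rcases key _ _ _ hp with h1 | ⟨c, hc⟩
      · exact h p (List.mem_cons_of_mem _ h1)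
      · have := h cur List.mem_cons_self
        subst hc
        simp
        omega
    rw [altLoop]
    simp only [if_neg h7, dif_pos hlt, hx]
    rw [ih hmem]
    simp only [List.foldl_cons, List.foldl_nil]
    rw [altPush_D cur x y rest, altPush_L, altPush_U, altPush_R]
    have hsub : 8 - cur.length = (7 - cur.length) + 1 := by omega
    rw [hsub]
    simp only [goA, if_neg h7, hx]
    have hlen : ∀ (c : Int × Int), 8 - (cur ++ [c]).length = 7 - cur.length := by
      intro c; simp
    simp only [List.foldl_append, foldl_ite_singleton, hlen]
  | case5 s cur rest h7 hlt ih =>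
    intro h
    have := h cur List.mem_cons_self
    omega

-- ===== VERDICT (by name: the statement is the Claim_ definition above) =====
theorem get_shapes_spec : Claim_equal_get_shapes := by
  intro shape shapes n _hdom hpre
  unfold Spec_get_shapes get_shapes get_shapes_alt
  obtain ⟨hne, hle⟩ := hpre
  have hlen : 1 ≤ shape.length := List.length_pos_iff.mpr hne
  rw [altLoop_eq [shape] shapes (by intro p hp; simp at hp; subst hp; exact hle)]
  simp [List.foldl]
  exact goA_fuel 8 (8 - shape.length) shape shapes hle (by omega) (by omega)
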